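-- pv_equiv track=rewrite | github.com/fantauzd/Greedy-Algorithms | FeedDog.py | feedDogMultipleBiscuits
-- ===== SOURCE A (Python) =====
-- def feedDogMultipleBiscuits(hunger_level, biscuit_size):
--     """
--     Solves the feed dog problem  where one dog can receive many biscuits.
--     :param hunger_level: an array where each index represents the hunger level of a dog
--     :param biscuit_size: an array where each index represents the size of a biscuit
--     :return: int, number of dogs that are satisfied
--     """
--     # sort the input arrays in ascending order
--     hunger_level.sort()        # timsort in O(nlogn)
--     biscuit_size.sort()
--     # initialize variables to track fed dogs and current dog
--     result = 0
--     dog = 0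
--     # we repeat until we run our of biscuits or dogs
--     for exchange in range(min(len(biscuit_size), len(hunger_level))):
--         # start with the smallest biscuit left
--         j = 0
--         # find the smallest biscuit that will satisfy the dog or use the largest biscuit
--         while j < (len(biscuit_size)-1) and hunger_level[dog] > biscuit_size[j]:
--             j += 1
--         # feed the biscuit to the dog
--         hunger_level[dog] -= biscuit_size[j]
--         biscuit_size.remove(biscuit_size[j])    #O(n) time complexity
--         # if the dog was satisfied then count it
--         if hunger_level[dog] <= 0:
--             result += 1
--             dog += 1
--
--     return result
-- ===== SOURCE B (Python) =====
-- def feedDogMultipleBiscuits(hunger_level, biscuit_size):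
--     """
--     Same greedy result, computed without mutating the inputs: sorted copies,
--     a hand-written binary search (lower bound) picks the smallest sufficient
--     biscuit in O(log n) instead of a linear rescan, and del/pop replace the
--     O(n) remove-by-value.  Number of exchanges is min of the initial lengths.
--     """
--     dogs = sorted(hunger_level)
--     bs = sorted(biscuit_size)
--     budget = min(len(dogs), len(bs))
--     fed = 0
--     i = 0
--     need = dogs[0] if dogs else 0
--     while budget > 0:
--         # first position whose biscuit is >= need (binary search on sorted bs)
--         lo, hi = 0, len(bs)
--         while lo < hi:
--             mid = (lo + hi) // 2
--             if bs[mid] < need: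
--                 lo = mid + 1
--             else:
--                 hi = mid
--         if lo < len(bs):
--             # smallest sufficient biscuit: this dog is satisfied
--             del bs[lo]
--             fed += 1
--             i += 1
--             if i < len(dogs):
--                 need = dogs[i]
--         else:
--             # no biscuit suffices: feed the largest one
--             need -= bs.pop()
--         budget -= 1
--     return fed
-- ===== Notes on version B (the rewrite author's own statement) =====
-- stated objective: faster
-- what changed: Replaces A's per-exchange linear rescan from j=0 plus O(n) remove-by-value on the mutated lists with a non-mutating single-pass state machine: a hand-written lower-bound binary search on the sorted biscuit list picks the smallest sufficient biscuit (or detects that none exists, so the largest is popped), and positional del/pop replace remove-by-value.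
import Mathlib
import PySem

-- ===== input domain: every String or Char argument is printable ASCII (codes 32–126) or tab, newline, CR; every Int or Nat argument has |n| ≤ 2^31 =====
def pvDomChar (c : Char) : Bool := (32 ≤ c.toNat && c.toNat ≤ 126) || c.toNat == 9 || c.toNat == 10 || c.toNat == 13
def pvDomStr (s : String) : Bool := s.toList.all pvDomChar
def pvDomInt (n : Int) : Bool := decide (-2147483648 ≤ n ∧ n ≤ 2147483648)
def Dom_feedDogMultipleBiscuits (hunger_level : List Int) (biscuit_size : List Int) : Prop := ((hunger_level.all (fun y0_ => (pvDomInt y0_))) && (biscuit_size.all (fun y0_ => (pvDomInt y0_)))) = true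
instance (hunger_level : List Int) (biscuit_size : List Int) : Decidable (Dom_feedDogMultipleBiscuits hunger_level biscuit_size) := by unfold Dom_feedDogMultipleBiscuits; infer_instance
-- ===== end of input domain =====

-- B replaces A's linear rescan + remove-by-value with a binary search (lower
-- bound) on the sorted biscuit list plus positional deletion; A sorts its two
-- argument lists IN PLACE and consumes biscuit_size (B does not mutate its
-- arguments) — the equivalence proved here is about the RETURN value only.

-- ===== PORT A =====
-- inner while loop of A:  while j < len(biscuit_size)-1 and hunger_level[dog] > biscuit_size[j]: j += 1
-- (fuel = len(biscuit_size) bounds the while loop's iterations and makes the recursion structural)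
def pvScanA (need : Int) (bs : List Int) : Nat → Nat → Nat
  | j, 0 => j
  | j, fuel + 1 =>
    if j < bs.length - 1 ∧ need > PySem.List.pyGetD bs (j : Int) 0 then
      pvScanA need bs (j + 1) fuel
    else j

-- one iteration of A's for-loop; state = (result, dog, hunger_level, biscuit_size)
def pvStepA (st : Int × Int × List Int × List Int) (_exchange : Int) : Int × Int × List Int × List Int :=
  let result := st.1
  let dog := st.2.1
  let hl := st.2.2.1
  let bs := st.2.2.2
  let j := pvScanA (PySem.List.pyGetD hl dog 0) bs 0 bs.length
  let b := PySem.List.pyGetD bs (j : Int) 0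
  let hl' := PySem.List.pySetD hl dog (PySem.List.pyGetD hl dog 0 - b)
  -- biscuit_size.remove(biscuit_size[j]): ValueError impossible (the element is drawn from the list)
  let bs' := (PySem.List.remove? bs b).getD bs
  if PySem.List.pyGetD hl' dog 0 ≤ 0 then
    (result + 1, dog + 1, hl', bs')
  else
    (result, dog, hl', bs')

def feedDogMultipleBiscuits (hunger_level : List Int) (biscuit_size : List Int) : Int :=
  let hl := PySem.List.sorted hunger_level (fun x => x) false
  let bs := PySem.List.sorted biscuit_size (fun x => x) false
  let st := (PySem.List.pyRange 0 (min (PySem.List.len bs) (PySem.List.len hl)) 1).foldl pvStepA (0, 0, hl, bs)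
  st.1

-- ===== PORT B =====
-- Source B's hand-written lower-bound binary search:  while lo < hi: mid = (lo+hi)//2; …
-- (lo, hi, mid are nonnegative throughout in Source B, so Nat with Nat division is exact here)
-- (fuel = len(bs) bounds the search's iterations, since hi - lo shrinks each round; structural recursion)
def pvLowerB (bs : List Int) (need : Int) : Nat → Nat → Nat → Nat
  | lo, _, 0 => lo
  | lo, hi, fuel + 1 =>
    if lo < hi then
      let mid := (lo + hi) / 2
      if PySem.List.pyGetD bs (mid : Int) 0 < need then pvLowerB bs need (mid + 1) hi fuel
      else pvLowerB bs need lo mid fuel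
    else lo

-- Source B's while-loop: state = (bs, fed, i, need), counting budget down; dogs is read-only.
-- del bs[lo] is eraseIdx; bs.pop() (nonempty whenever budget > 0) is last element + dropLast.
def pvGoB (dogs : List Int) (bs : List Int) (fed : Int) (i : Nat) (need : Int) : Nat → Int
  | 0 => fed
  | budget + 1 =>
    let lo := pvLowerB bs need 0 bs.length bs.length
    if lo < bs.length then
      let need' := if i + 1 < dogs.length then PySem.List.pyGetD dogs ((i : Int) + 1) 0 else need
      pvGoB dogs (bs.eraseIdx lo) (fed + 1) (i + 1) need' budget
    else
      pvGoB dogs bs.dropLast fed i (need - PySem.List.pyGetD bs (-1) 0) budget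

def feedDogMultipleBiscuits_alt (hunger_level : List Int) (biscuit_size : List Int) : Int :=
  let dogs := PySem.List.sorted hunger_level (fun x => x) false
  let bs := PySem.List.sorted biscuit_size (fun x => x) false
  let budget := min dogs.length bs.length
  -- dogs[0] if dogs else 0
  pvGoB dogs bs 0 0 (PySem.List.pyGetD dogs 0 0) budget

-- ===== PRECONDITION & SPEC =====
def Spec_feedDogMultipleBiscuits (hunger_level : List Int) (biscuit_size : List Int) (out : Int) : Prop := out = feedDogMultipleBiscuits_alt hunger_level biscuit_size
instance (hunger_level : List Int) (biscuit_size : List Int) (out : Int) : Decidable (Spec_feedDogMultipleBiscuits hunger_level biscuit_size out) := by unfold Spec_feedDogMultipleBiscuits; infer_instance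

-- ===== CLAIM (what is proved, stated in full; the proofs are below) =====
def Claim_equal_feedDogMultipleBiscuits : Prop := ∀ (hunger_level : List Int) (biscuit_size : List Int), Dom_feedDogMultipleBiscuits hunger_level biscuit_size → Spec_feedDogMultipleBiscuits hunger_level biscuit_size (feedDogMultipleBiscuits hunger_level biscuit_size)

-- ===== LEMMAS AND PROOFS =====

lemma pv_getD_mid (pre suf : List Int) (x d : Int) : (pre ++ x :: suf).getD pre.length d = x := by
  simp [List.getD]

lemma pv_pySetD_mid (pre suf : List Int) (x v : Int) :
    PySem.List.pySetD (pre ++ x :: suf) (pre.length : Int) v = pre ++ v :: suf := by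
  simp only [PySem.List.pySetD, PySem.List.pySet?, PySem.List.pyIdx?]
  simp

lemma pv_sorted_getD_mono {bs : List Int} (h : bs.Pairwise (· ≤ ·)) {i j : Nat}
    (hij : i ≤ j) (hj : j < bs.length) (d : Int) : bs.getD i d ≤ bs.getD j d := by
  rcases Nat.lt_or_eq_of_le hij with h' | rfl
  · have hi : i < bs.length := by omega
    have := (List.pairwise_iff_getElem.mp h) i j hi hj h'
    simpa [List.getD, List.getElem?_eq_getElem, hi, hj] using this
  · rfl

-- characterisation of Source B's binary-search result: a lower bound position for need in bs
def pvIsLB (bs : List Int) (need : Int) (r : Nat) : Prop :=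
  r ≤ bs.length ∧ (∀ k, k < r → bs.getD k 0 < need) ∧
    (∀ k, r ≤ k → k < bs.length → need ≤ bs.getD k 0)

lemma pv_lowerB_spec (bs : List Int) (need : Int) (h : bs.Pairwise (· ≤ ·)) :
    ∀ (fuel lo hi : Nat), hi - lo ≤ fuel → lo ≤ hi → hi ≤ bs.length →
    (∀ k, k < lo → bs.getD k 0 < need) →
    (∀ k, hi ≤ k → k < bs.length → need ≤ bs.getD k 0) →
    pvIsLB bs need (pvLowerB bs need lo hi fuel) := by
  intro fuel
  induction fuel with
  | zero =>
    intro lo hi hfuel hle hhi hlow hhigh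
    have : lo = hi := by omega
    subst this
    simp only [pvLowerB]
    exact ⟨hhi, hlow, hhigh⟩
  | succ fuel ih =>
    intro lo hi hfuel hle hhi hlow hhigh
    rw [pvLowerB]
    by_cases hlt : lo < hi
    · simp only [hlt, if_true]
      have hmid1 : lo ≤ (lo + hi) / 2 := by omega
      have hmid2 : (lo + hi) / 2 < hi := by omega
      rw [PySem.List.pyGetD_natCast]
      by_cases hc : bs.getD ((lo + hi) / 2) 0 < need
      · simp only [hc, if_true]
        apply ih ((lo + hi) / 2 + 1) hi (by omega) (by omega) hhi
        · intro k hk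
          calc bs.getD k 0 ≤ bs.getD ((lo + hi) / 2) 0 :=
                pv_sorted_getD_mono h (by omega) (by omega) 0
            _ < need := hc
        · exact hhigh
      · simp only [hc, if_false]
        apply ih lo ((lo + hi) / 2) (by omega) (by omega) (by omega) hlow
        intro k hk hklen
        calc need ≤ bs.getD ((lo + hi) / 2) 0 := not_lt.mp hc
          _ ≤ bs.getD k 0 := pv_sorted_getD_mono h hk hklen 0
    · simp only [hlt, if_false]
      have : lo = hi := by omega
      subst this
      exact ⟨hhi, hlow, hhigh⟩

lemma pv_lowerB_isLB (bs : List Int) (need : Int) (h : bs.Pairwise (· ≤ ·)) :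
    pvIsLB bs need (pvLowerB bs need 0 bs.length bs.length) :=
  pv_lowerB_spec bs need h bs.length 0 bs.length (by omega) (by omega) le_rfl
    (by intro k hk; omega) (by intro k hk hklen; omega)

-- A's linear scan lands on the same index: min of the lower bound and len-1
lemma pv_scanA_eq (bs : List Int) (need : Int) (p : Nat) (hlb : pvIsLB bs need p) :
    ∀ (fuel j : Nat), min p (bs.length - 1) - j ≤ fuel → j ≤ min p (bs.length - 1) →
    pvScanA need bs j fuel = min p (bs.length - 1) := by
  obtain ⟨hplen, hbelow, habove⟩ := hlb
  intro fuel
  induction fuel with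
  | zero =>
    intro j hfuel hj
    have hjm : j = min p (bs.length - 1) := by omega
    simp only [pvScanA]
    exact hjm
  | succ fuel ih =>
    intro j hfuel hj
    by_cases hjm : j = min p (bs.length - 1)
    · rw [pvScanA]
      rw [if_neg]
      · exact hjm
      · rintro ⟨h1, h2⟩
        rw [PySem.List.pyGetD_natCast] at h2
        have : need ≤ bs.getD j 0 := habove j (by omega) (by omega)
        omega
    · have hjlt : j < min p (bs.length - 1) := by omega
      rw [pvScanA]
      rw [if_pos]
      · exact ih (j + 1) (by omega) (by omega)
      · refine ⟨by omega, ?_⟩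
        rw [PySem.List.pyGetD_natCast]
        exact hbelow j (by omega)

lemma pv_erase_getElem_sorted (bs : List Int) (h : bs.Pairwise (· ≤ ·)) (p : Nat)
    (hp : p < bs.length) : bs.erase bs[p] = bs.eraseIdx p := by
  have hsplit : bs.take p ++ bs[p] :: bs.drop (p + 1) = bs := by
    rw [← List.drop_eq_getElem_cons hp, List.take_append_drop]
  have hperm1 : List.Perm (bs[p] :: bs.eraseIdx p) bs := by
    rw [List.eraseIdx_eq_take_drop_succ]
    have h2 : List.Perm (bs[p] :: (bs.take p ++ bs.drop (p + 1)))
        (bs.take p ++ bs[p] :: bs.drop (p + 1)) := List.perm_middle.symm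
    rw [hsplit] at h2
    exact h2
  have hperm2 : List.Perm bs (bs[p] :: bs.erase bs[p]) :=
    List.perm_cons_erase (bs.getElem_mem hp)
  have hperm : List.Perm (bs.erase bs[p]) (bs.eraseIdx p) :=
    (hperm2.symm.trans hperm1.symm).cons_inv
  have hs1 : (bs.erase bs[p]).Pairwise (· ≤ ·) := by
    apply List.Pairwise.sublist <;> first | exact List.erase_sublist | exact h
  have hs2 : (bs.eraseIdx p).Pairwise (· ≤ ·) := by
    apply List.Pairwise.sublist <;> first | exact List.eraseIdx_sublist bs p | exact h
  apply List.Perm.eq_of_pairwise <;>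
    first
    | exact hperm | exact hs1 | exact hs2
    | (intro a b _ _ h1 h2; exact le_antisymm h1 h2)

lemma pv_sorted_eraseIdx {bs : List Int} (h : bs.Pairwise (· ≤ ·)) (p : Nat) :
    (bs.eraseIdx p).Pairwise (· ≤ ·) := by
  apply List.Pairwise.sublist <;> first | exact List.eraseIdx_sublist bs p | exact h

lemma pv_sorted_dropLast {bs : List Int} (h : bs.Pairwise (· ≤ ·)) :
    bs.dropLast.Pairwise (· ≤ ·) := by
  apply List.Pairwise.sublist <;> first | exact List.dropLast_sublist bs | exact h

-- the main loop invariant: A's fold state (result, dog, hl, bs) tracks B's (fed, i, need, bs);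
-- hl = pre ++ need :: suf where pre holds the already-processed (overwritten) entries
lemma pv_main (dogs : List Int) :
    ∀ (budget : Nat) (a : Int) (pre suf bs : List Int) (fed need : Int),
    bs.Pairwise (· ≤ ·) →
    budget ≤ bs.length →
    budget ≤ suf.length + 1 →
    dogs.length = pre.length + 1 + suf.length →
    dogs.drop (pre.length + 1) = suf →
    ((PySem.List.pyRange a (a + budget) 1).foldl pvStepA
        (fed, (pre.length : Int), pre ++ need :: suf, bs)).1
      = pvGoB dogs bs fed pre.length need budget := by
  intro budget
  induction budget with
  | zero =>
    intro a pre suf bs fed need _ _ _ _ _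
    simp [pvGoB]
  | succ budget ih =>
    intro a pre suf bs fed need hsort hbs hsuf hlen hdrop
    have hn : 1 ≤ bs.length := by omega
    have hne : bs ≠ [] := by cases bs <;> simp_all
    rw [PySem.List.pyRange_one_cons (by push_cast; omega), List.foldl_cons]
    rw [pvGoB]
    simp only []
    obtain ⟨hplen, hbelow, habove⟩ := pv_lowerB_isLB bs need hsort
    have hscan : pvScanA need bs 0 bs.length =
        min (pvLowerB bs need 0 bs.length bs.length) (bs.length - 1) :=
      pv_scanA_eq bs need _ ⟨hplen, hbelow, habove⟩ bs.length 0 (by omega) (by omega)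
    generalize hgen : pvLowerB bs need 0 bs.length bs.length = p at hplen hbelow habove hscan ⊢
    have hstep : pvStepA (fed, (pre.length : Int), pre ++ need :: suf, bs) a =
        (if need - bs.getD (min p (bs.length - 1)) 0 ≤ 0 then
          (fed + 1, (pre.length : Int) + 1, pre ++ (need - bs.getD (min p (bs.length - 1)) 0) :: suf,
            (PySem.List.remove? bs (bs.getD (min p (bs.length - 1)) 0)).getD bs)
        else
          (fed, (pre.length : Int), pre ++ (need - bs.getD (min p (bs.length - 1)) 0) :: suf,
            (PySem.List.remove? bs (bs.getD (min p (bs.length - 1)) 0)).getD bs)) := by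
      simp only [pvStepA, PySem.List.pyGetD_natCast, pv_getD_mid, hscan, pv_pySetD_mid]
    have hrange : a + ((budget : Nat) + 1 : Nat) = (a + 1) + (budget : Nat) := by push_cast; ring
    have hremove : ∀ q : Nat, q < bs.length →
        (PySem.List.remove? bs (bs.getD q 0)).getD bs = bs.eraseIdx q := by
      intro q hq
      have hgd : bs.getD q 0 = bs[q] := List.getD_eq_getElem bs 0 hq
      have hmem : bs[q] ∈ bs := List.getElem_mem hq
      rw [hgd, PySem.List.remove?_eq_some_erase _ _ hmem, Option.getD_some,
        pv_erase_getElem_sorted bs hsort q hq]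
    by_cases hplt : p < bs.length
    · -- a biscuit ≥ need exists: this dog is satisfied
      have hmin : min p (bs.length - 1) = p := by omega
      have hbge : need ≤ bs.getD p 0 := habove p le_rfl hplt
      rw [hstep, hmin, if_pos (by omega), hremove p hplt, if_pos hplt]
      rw [hrange]
      cases budget with
      | zero =>
        simp [pvGoB]
      | succ bb =>
        cases suf with
        | nil => simp at hsuf
        | cons s st =>
          have hidx : pre.length + 1 < dogs.length := by
            simp only [List.length_cons] at hlen; omega
          have hneed' : PySem.List.pyGetD dogs ((pre.length : Int) + 1) 0 = s := by
            have hc : ((pre.length : Int) + 1) = ((pre.length + 1 : Nat) : Int) := by push_cast; ring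
            rw [hc, PySem.List.pyGetD_natCast]
            have hd := congrArg (fun l => l.getD 0 (0 : Int)) hdrop
            simpa [List.getD, List.getElem?_drop] using hd
          rw [if_pos hidx, hneed']
          have heq1 : pre ++ (need - bs.getD p 0) :: s :: st =
              (pre ++ [need - bs.getD p 0]) ++ s :: st := by simp
          have heq2 : (pre.length : Int) + 1 = (((pre ++ [need - bs.getD p 0]).length : Nat) : Int) := by
            simp
          rw [heq1, heq2, ih (a + 1) (pre ++ [need - bs.getD p 0]) st (bs.eraseIdx p) (fed + 1) s
            (pv_sorted_eraseIdx hsort p)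
            (by rw [List.length_eraseIdx_of_lt hplt]; omega)
            (by simp only [List.length_cons] at hsuf; omega)
            (by simp only [List.length_cons] at hlen ⊢; simp; omega)
            (by
              have hd := congrArg (fun l => l.drop 1) hdrop
              simp only [List.drop_drop] at hd
              simpa [List.length_append, Nat.add_comm] using hd)]
          simp
    · -- no biscuit suffices: the largest is fed to the dog
      have hpeq : p = bs.length := by omega
      have hmin : min p (bs.length - 1) = bs.length - 1 := by omega
      have hblt : bs.getD (bs.length - 1) 0 < need := hbelow (bs.length - 1) (by omega)
      rw [hstep, hmin, if_neg (by omega), hremove (bs.length - 1) (by omega),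
        List.eraseIdx_length_sub_one, if_neg hplt]
      rw [hrange]
      have hlast : PySem.List.pyGetD bs (-1) 0 = bs.getD (bs.length - 1) 0 := by
        rw [PySem.List.pyGetD_neg_ofNat bs 1 0 (by omega) (by omega)]
        exact (List.getD_eq_getElem bs 0 (by omega)).symm
      rw [hlast]
      exact ih (a + 1) pre suf bs.dropLast fed (need - bs.getD (bs.length - 1) 0)
        (pv_sorted_dropLast hsort)
        (by rw [List.length_dropLast]; omega)
        (by omega)
        hlen hdrop

lemma pv_top (dogs bs : List Int) (hsort : bs.Pairwise (· ≤ ·)) :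
    ((PySem.List.pyRange 0 (min ((bs.length : Int)) ((dogs.length : Int))) 1).foldl pvStepA
        (0, 0, dogs, bs)).1
      = pvGoB dogs bs 0 0 (PySem.List.pyGetD dogs 0 0) (min dogs.length bs.length) := by
  cases dogs with
  | nil =>
    have h0 : min ((bs.length : Int)) (((List.length ([] : List Int)) : Int)) = 0 := by
      simp only [List.length_nil, Nat.cast_zero]; omega
    rw [h0]
    simp [pvGoB]
  | cons h0 rest =>
    have hmin : min ((bs.length : Int)) (((h0 :: rest).length : Int)) =
        0 + ((min (h0 :: rest).length bs.length : Nat) : Int) := by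
      push_cast; omega
    rw [hmin]
    have hneed0 : PySem.List.pyGetD (h0 :: rest) 0 0 = h0 := PySem.List.pyGetD_zero_cons h0 rest 0
    rw [hneed0]
    have := pv_main (h0 :: rest) (min (h0 :: rest).length bs.length) 0 [] rest bs 0 h0 hsort
      (Nat.min_le_right _ _)
      (by simp only [List.length_cons]; omega)
      (by simp only [List.length_nil, List.length_cons]; omega)
      (by simp)
    simpa using this

-- ===== VERDICT (by name: the statement is the Claim_ definition above) =====
theorem feedDogMultipleBiscuits_spec : Claim_equal_feedDogMultipleBiscuits := by
  unfold Claim_equal_feedDogMultipleBiscuits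
  intro hunger_level biscuit_size _
  unfold Spec_feedDogMultipleBiscuits feedDogMultipleBiscuits feedDogMultipleBiscuits_alt
  simp only [PySem.List.len_eq]
  exact pv_top (PySem.List.sorted hunger_level (fun x => x) false)
    (PySem.List.sorted biscuit_size (fun x => x) false)
    (PySem.List.sorted_pairwise biscuit_size (fun x => x))
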